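-- pv_equiv track=rewrite | github.com/Bombardlos/Kobon_Triangle_Workspace | compile_11(new,more_efficient).py | generate_fauxdicts
-- ===== SOURCE A (Python) =====
-- def generate_fauxdicts(k):
--     fauxdict_left = [[] for _ in range(k - 1)]  # Create a list of empty lists
--     fauxdict_right = [[] for _ in range(k - 1)]
--     fauxdicts = [fauxdict_left, fauxdict_right]
--     kmod = k % 2
--
--     # Populate fauxdict_left
--     for i in range(1, k - 1, 2):
--         fauxdict_left[i - 1].append(i + 1)
--         fauxdict_left[i].append(i)
--
--     # Special case 0's
--     fauxdict_right[0].append(0)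
--     fauxdicts[kmod][k - 2].append(0)
--
--     for i in range(2, k - kmod, 2):
--         fauxdict_right[i - 1].append(i + 1)
--         fauxdict_right[i].append(i)
--
--     return fauxdict_left, fauxdict_right
-- ===== SOURCE B (Python) =====
-- def generate_fauxdicts(k):
--     # Closed-form per-index fill: each cell's content is determined by the
--     # parity of its own index j, instead of scattering appends from loops over i.
--     def left_cell(j):
--         if j % 2 == 1:
--             return [j]
--         if j <= k - 3:
--             return [j + 2]
--         return [0] if k % 2 == 0 else []  # j == k-2 with k even carries the sentinel 0
--     def right_cell(j):
--         if j == 0: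
--             return [0]
--         if j % 2 == 0:
--             return [j]
--         if j < k - 1 - k % 2:
--             return [j + 2]
--         return [0] if k % 2 == 1 else []  # j == k-2 with k odd carries the sentinel 0
--     return [left_cell(j) for j in range(k - 1)], [right_cell(j) for j in range(k - 1)]
-- ===== Notes on version B (the rewrite author's own statement) =====
-- stated objective: alternative
-- what changed: A allocates two lists of empty lists and scatters appends into them via two strided loops over source indices plus aliased sentinel writes; B builds each list directly with one comprehension per list, computing every cell from a closed-form parity/boundary rule on its own index.
import Mathlib
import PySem

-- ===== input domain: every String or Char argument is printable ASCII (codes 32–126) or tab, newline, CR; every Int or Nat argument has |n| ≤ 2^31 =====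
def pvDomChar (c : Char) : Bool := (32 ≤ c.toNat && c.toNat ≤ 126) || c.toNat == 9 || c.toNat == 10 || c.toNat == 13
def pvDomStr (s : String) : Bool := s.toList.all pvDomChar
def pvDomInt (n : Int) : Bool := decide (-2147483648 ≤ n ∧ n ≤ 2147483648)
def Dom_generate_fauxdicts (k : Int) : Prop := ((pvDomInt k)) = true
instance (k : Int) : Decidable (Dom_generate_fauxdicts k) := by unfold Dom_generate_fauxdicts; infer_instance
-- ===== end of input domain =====

-- B replaces A's scatter-style loops by a closed-form per-index parity rule (different decomposition, same cost).

-- ===== PORT A =====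
-- xs[i].append(v) on a list of lists (i known nonnegative wherever A returns; no-op out of range)
def pvAppAt (xs : List (List Int)) (i : Int) (v : Int) : List (List Int) :=
  if 0 ≤ i then xs.modify i.toNat (fun l => l ++ [v]) else xs

-- one iteration of A's scatter loops: lst[i-1].append(i+1); lst[i].append(i)
def pvStep (L : List (List Int)) (i : Int) : List (List Int) :=
  pvAppAt (pvAppAt L (i - 1) (i + 1)) i i

def generate_fauxdicts (k : Int) : List (List Int) × List (List Int) :=
  let n := (k - 1).toNat                                   -- len(range(k-1))
  let left0 : List (List Int) := List.replicate n []
  let right0 : List (List Int) := List.replicate n []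
  let kmod := PySem.Int.mod k 2
  -- for i in range(1, k-1, 2): left[i-1].append(i+1); left[i].append(i)
  let left1 := (PySem.List.pyRange 1 (k - 1) 2).foldl pvStep left0
  -- fauxdict_right[0].append(0)
  let right1 := pvAppAt right0 0 0
  -- fauxdicts[kmod][k-2].append(0): mutates left if kmod == 0, right if kmod == 1
  let left2 := if kmod = 0 then pvAppAt left1 (k - 2) 0 else left1
  let right2 := if kmod = 0 then right1 else pvAppAt right1 (k - 2) 0
  -- for i in range(2, k-kmod, 2): right[i-1].append(i+1); right[i].append(i)
  let right3 := (PySem.List.pyRange 2 (k - kmod) 2).foldl pvStep right2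
  (left2, right3)

-- ===== PORT B =====
def pvLeftCell (k j : Int) : List Int :=
  if PySem.Int.mod j 2 = 1 then [j]
  else if j ≤ k - 3 then [j + 2]
  else if PySem.Int.mod k 2 = 0 then [0] else []

def pvRightCell (k j : Int) : List Int :=
  if j = 0 then [0]
  else if PySem.Int.mod j 2 = 0 then [j]
  else if j < k - 1 - PySem.Int.mod k 2 then [j + 2]
  else if PySem.Int.mod k 2 = 1 then [0] else []

def generate_fauxdicts_alt (k : Int) : List (List Int) × List (List Int) :=
  ((PySem.List.pyRange 0 (k - 1) 1).map (pvLeftCell k),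
   (PySem.List.pyRange 0 (k - 1) 1).map (pvRightCell k))

-- ===== PRECONDITION & SPEC =====
-- A indexes right[0] and fauxdicts[kmod][k-2], which raises IndexError for every k < 2.
def Pre_generate_fauxdicts (k : Int) : Prop := 2 ≤ k
instance (k : Int) : Decidable (Pre_generate_fauxdicts k) := by unfold Pre_generate_fauxdicts; infer_instance
def pvWitness_generate_fauxdicts : Int := 5

def Spec_generate_fauxdicts (k : Int) (out : List (List Int) × List (List Int)) : Prop := out = generate_fauxdicts_alt k
instance (k : Int) (out : List (List Int) × List (List Int)) : Decidable (Spec_generate_fauxdicts k out) := by unfold Spec_generate_fauxdicts; infer_instance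

-- ===== CLAIM (what is proved, stated in full; the proofs are below) =====
def Claim_equal_generate_fauxdicts : Prop := ∀ (k : Int), Dom_generate_fauxdicts k → Pre_generate_fauxdicts k → Spec_generate_fauxdicts k (generate_fauxdicts k)

-- ===== LEMMAS AND PROOFS =====

set_option maxHeartbeats 1000000

lemma length_pvAppAt (xs : List (List Int)) (i v : Int) : (pvAppAt xs i v).length = xs.length := by
  unfold pvAppAt; split <;> simp

lemma getElem?_pvAppAt (xs : List (List Int)) (i v : Int) (j : Nat) (hj : j < xs.length) :
    (pvAppAt xs i v)[j]? = some (if i = (j : Int) then xs[j] ++ [v] else xs[j]) := by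
  unfold pvAppAt
  by_cases hpos : 0 ≤ i
  · have h' : j < (xs.modify i.toNat (fun l => l ++ [v])).length := by simpa using hj
    simp only [hpos, if_true]
    rw [List.getElem?_eq_getElem h', List.getElem_modify]
    by_cases hij : i = (j : Int)
    · have ht : i.toNat = j := by omega
      simp [ht, hij]
    · have ht : i.toNat ≠ j := by omega
      simp [ht, hij]
  · have hne : i ≠ (j : Int) := by omega
    simp only [hpos, if_false, hne]
    rw [List.getElem?_eq_getElem hj]

lemma length_foldl_pvStep (is : List Int) (L : List (List Int)) :
    (is.foldl pvStep L).length = L.length := by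
  induction is generalizing L with
  | nil => rfl
  | cons i is ih => simp [List.foldl_cons, ih, pvStep, length_pvAppAt]

lemma getElem?_foldl_pvStep (is : List Int) (p : Int)
    (hpar : ∀ i ∈ is, i % 2 = p) (hnd : is.Nodup)
    (L : List (List Int)) (j : Nat) (hj : j < L.length) :
    (is.foldl pvStep L)[j]? =
      some ((L[j] ++ (if ((j : Int) + 1) ∈ is then [(j : Int) + 2] else []))
           ++ (if ((j : Int)) ∈ is then [(j : Int)] else [])) := by
  induction is generalizing L with
  | nil => simp [List.getElem?_eq_getElem hj]
  | cons i is ih =>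
    have hjA : j < (pvAppAt L (i - 1) (i + 1)).length := by rw [length_pvAppAt]; exact hj
    have hj1 : j < (pvStep L i).length := by
      unfold pvStep; rw [length_pvAppAt, length_pvAppAt]; exact hj
    rw [List.foldl_cons, ih (fun x hx => hpar x (List.mem_cons_of_mem _ hx)) hnd.of_cons (pvStep L i) hj1]
    have e1 : (pvAppAt L (i - 1) (i + 1))[j]'hjA =
        if i - 1 = (j : Int) then L[j] ++ [i + 1] else L[j] := by
      have h := getElem?_pvAppAt L (i - 1) (i + 1) j hj
      rw [List.getElem?_eq_getElem hjA] at h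
      exact Option.some.inj h
    have e2 : (pvStep L i)[j]'hj1 =
        if i = (j : Int) then (pvAppAt L (i - 1) (i + 1))[j]'hjA ++ [i]
        else (pvAppAt L (i - 1) (i + 1))[j]'hjA := by
      have h : (pvStep L i)[j]? =
          some (if i = (j : Int) then (pvAppAt L (i - 1) (i + 1))[j] ++ [i]
                else (pvAppAt L (i - 1) (i + 1))[j]) := getElem?_pvAppAt _ i i j hjA
      rw [List.getElem?_eq_getElem hj1] at h
      exact Option.some.inj h
    rw [e2, e1]
    have hpi : i % 2 = p := hpar i List.mem_cons_self
    have hnotin : i ∉ is := (List.nodup_cons.mp hnd).1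
    have hpj : ((j : Int)) ∈ is → (j : Int) % 2 = p := fun h => hpar _ (List.mem_cons_of_mem _ h)
    have hpj1 : ((j : Int) + 1) ∈ is → ((j : Int) + 1) % 2 = p := fun h => hpar _ (List.mem_cons_of_mem _ h)
    by_cases h1 : i = (j : Int) + 1 <;> by_cases h2 : i = (j : Int) <;>
      by_cases h3 : ((j : Int) + 1) ∈ is <;> by_cases h4 : ((j : Int)) ∈ is <;>
      [skip; skip; skip; skip; skip; skip; skip; skip; skip; skip; skip; skip; skip; skip; skip; skip] <;>
      first
        | omega
        | (exact absurd h3 (h1 ▸ hnotin))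
        | (exact absurd h4 (h2 ▸ hnotin))
        | (exfalso; have := hpj h4; omega)
        | (exfalso; have := hpj1 h3; omega)
        | (have hd1 : i - 1 = (j : Int) ↔ i = (j : Int) + 1 := by omega
           simp [hd1, h1, h2, h3, h4, List.mem_cons] <;> omega)

lemma nodup_pyRange_two (a b : Int) : (PySem.List.pyRange a b 2).Nodup := by
  rw [PySem.List.pyRange_of_pos a b (by norm_num)]
  exact List.nodup_range.map (fun x y h => by omega)

theorem generate_fauxdicts_spec : Claim_equal_generate_fauxdicts := by
  intro k _ hk
  unfold Pre_generate_fauxdicts at hk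
  unfold Spec_generate_fauxdicts generate_fauxdicts generate_fauxdicts_alt
  have hmod : PySem.Int.mod k 2 = k % 2 := PySem.Int.mod_eq_emod_of_pos (by omega)
  have hmodj : ∀ j : Int, PySem.Int.mod j 2 = j % 2 := fun j => PySem.Int.mod_eq_emod_of_pos (by omega)
  have memL : ∀ x : Int, x ∈ PySem.List.pyRange 1 (k - 1) 2 ↔ 1 ≤ x ∧ x < k - 1 ∧ 2 ∣ x - 1 :=
    PySem.List.mem_pyRange_iff_of_pos (by norm_num)
  have memR : ∀ x : Int, x ∈ PySem.List.pyRange 2 (k - k % 2) 2 ↔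
      2 ≤ x ∧ x < k - k % 2 ∧ 2 ∣ x - 2 :=
    PySem.List.mem_pyRange_iff_of_pos (by norm_num)
  have parL : ∀ i ∈ PySem.List.pyRange 1 (k - 1) 2, i % 2 = 1 := by
    intro i hi; have := (memL i).mp hi; omega
  have parR : ∀ i ∈ PySem.List.pyRange 2 (k - k % 2) 2, i % 2 = 0 := by
    intro i hi; have := (memR i).mp hi; omega
  have hrep : (List.replicate (k - 1).toNat ([] : List Int)).length = (k - 1).toNat :=
    List.length_replicate
  rw [hmod]
  refine Prod.ext ?_ ?_ <;> simp only []
  · -- left component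
    apply List.ext_getElem?
    intro j
    by_cases hjn : j < (k - 1).toNat
    · have hjf : j < ((PySem.List.pyRange 1 (k - 1) 2).foldl pvStep
          (List.replicate (k - 1).toNat [])).length := by
        rw [length_foldl_pvStep, hrep]; exact hjn
      have hfold := getElem?_foldl_pvStep (PySem.List.pyRange 1 (k - 1) 2) 1 parL
        (nodup_pyRange_two _ _) (List.replicate (k - 1).toNat []) j (by simpa using hjn)
      rw [List.getElem?_map, PySem.List.getElem?_pyRange_one,
          if_pos (show j < (k - 1 - 0).toNat by omega)]
      by_cases hke : k % 2 = 0
      · rw [if_pos hke,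
            getElem?_pvAppAt _ _ _ j (by rw [length_foldl_pvStep, hrep]; exact hjn)]
        have eX : ((PySem.List.pyRange 1 (k - 1) 2).foldl pvStep
            (List.replicate (k - 1).toNat []))[j]'hjf =
            ((List.replicate (k - 1).toNat ([] : List Int))[j]'(by simpa using hjn)
              ++ (if ((j : Int) + 1) ∈ PySem.List.pyRange 1 (k - 1) 2 then [(j : Int) + 2] else []))
              ++ (if ((j : Int)) ∈ PySem.List.pyRange 1 (k - 1) 2 then [(j : Int)] else []) := by
          rw [List.getElem?_eq_getElem hjf] at hfold
          exact Option.some.inj hfold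
        rw [eX]
        simp only [List.getElem_replicate, List.nil_append, Option.map_some, memL]
        simp only [zero_add]
        unfold pvLeftCell
        rw [hmodj, hmod]
        have hjk : (j : Int) < k - 1 := by omega
        congr 1
        split_ifs <;>
          (try simp only [zero_add, List.append_nil, List.nil_append, List.append_assoc]) <;>
          first | rfl | (exfalso; omega) | omega | (congr 1 <;> omega)
      · rw [if_neg hke, hfold]
        simp only [List.getElem_replicate, List.nil_append, Option.map_some, memL]
        simp only [zero_add]
        unfold pvLeftCell
        rw [hmodj, hmod]
        have hjk : (j : Int) < k - 1 := by omega
        congr 1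
        split_ifs <;>
          (try simp only [zero_add, List.append_nil, List.nil_append, List.append_assoc]) <;>
          first | rfl | (exfalso; omega) | omega | (congr 1 <;> omega)
    · rw [List.getElem?_eq_none, List.getElem?_eq_none]
      · simp only [List.length_map, PySem.List.length_pyRange_one]; omega
      · by_cases hke : k % 2 = 0
        · rw [if_pos hke, length_pvAppAt, length_foldl_pvStep, hrep]; omega
        · rw [if_neg hke, length_foldl_pvStep, hrep]; omega
  · -- right component
    apply List.ext_getElem?
    intro j
    by_cases hjn : j < (k - 1).toNat
    · have hlenA : j < (pvAppAt (List.replicate (k - 1).toNat []) 0 0).length := by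
        rw [length_pvAppAt, hrep]; exact hjn
      rw [List.getElem?_map, PySem.List.getElem?_pyRange_one,
          if_pos (show j < (k - 1 - 0).toNat by omega)]
      have eA : (pvAppAt (List.replicate (k - 1).toNat []) 0 0)[j]'hlenA =
          if (0 : Int) = (j : Int) then [(0 : Int)] else [] := by
        have h := getElem?_pvAppAt (List.replicate (k - 1).toNat []) 0 0 j (by simpa using hjn)
        rw [List.getElem?_eq_getElem hlenA] at h
        have := Option.some.inj h
        simpa using this
      by_cases hke : k % 2 = 0
      · rw [if_pos hke,
            getElem?_foldl_pvStep (PySem.List.pyRange 2 (k - k % 2) 2) 0 parR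
              (nodup_pyRange_two _ _) _ j hlenA]
        rw [eA]
        simp only [Option.map_some, memR]
        simp only [zero_add]
        unfold pvRightCell
        rw [hmodj, hmod]
        have hjk : (j : Int) < k - 1 := by omega
        congr 1
        split_ifs <;>
          (try simp only [zero_add, List.append_nil, List.nil_append, List.append_assoc]) <;>
          first | rfl | (exfalso; omega) | omega | (congr 1 <;> omega)
      · have hlenB : j < (pvAppAt (pvAppAt (List.replicate (k - 1).toNat []) 0 0) (k - 2) 0).length := by
          rw [length_pvAppAt]; exact hlenA
        rw [if_neg hke,
            getElem?_foldl_pvStep (PySem.List.pyRange 2 (k - k % 2) 2) 0 parR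
              (nodup_pyRange_two _ _) _ j hlenB]
        have eB : (pvAppAt (pvAppAt (List.replicate (k - 1).toNat []) 0 0) (k - 2) 0)[j]'hlenB =
            if (k - 2 : Int) = (j : Int)
            then (if (0 : Int) = (j : Int) then [(0 : Int)] else []) ++ [0]
            else (if (0 : Int) = (j : Int) then [(0 : Int)] else []) := by
          have h := getElem?_pvAppAt (pvAppAt (List.replicate (k - 1).toNat []) 0 0) (k - 2) 0 j hlenA
          rw [List.getElem?_eq_getElem hlenB] at h
          have h2 := Option.some.inj h
          rw [h2, eA]
        rw [eB]
        simp only [Option.map_some, memR]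
        simp only [zero_add]
        unfold pvRightCell
        rw [hmodj, hmod]
        have hjk : (j : Int) < k - 1 := by omega
        congr 1
        split_ifs <;>
          (try simp only [zero_add, List.append_nil, List.nil_append, List.append_assoc]) <;>
          first | rfl | (exfalso; omega) | omega | (congr 1 <;> omega)
    · rw [List.getElem?_eq_none, List.getElem?_eq_none]
      · simp only [List.length_map, PySem.List.length_pyRange_one]; omega
      · by_cases hke : k % 2 = 0
        · rw [if_pos hke, length_foldl_pvStep, length_pvAppAt, hrep]; omega
        · rw [if_neg hke, length_foldl_pvStep, length_pvAppAt, length_pvAppAt, hrep]; omega
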